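-- pv_equiv track=rewrite | github.com/ThrizTar/Code-homework-python | Homework&Lab DS Programming/Lab/Lab10_1/Lab10_1_630510609.py | bean_count
-- ===== SOURCE A (Python) =====
-- def bean_count(n):
--     bean = 0
--     if(n <= 0) or (n % 100 == 0):
--         bean = 0
--         return bean
--
--     while n != 0:
--         n %= 100
--         for i in range(1, n+1):
--             if(i % 100 == 0):
--                 bean = 0
--             elif(i % 10 == 0):
--                 bean -= 5
--             else:
--                 bean += 1
--         n //= 100
--     return bean
-- ===== SOURCE B (Python) =====
-- def bean_count(n):
--     if n <= 0 or n % 100 == 0: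
--         return 0
--     m = n % 100
--     return m - 6 * (m // 10)
-- ===== Notes on version B (the rewrite author's own statement) =====
-- stated objective: simpler
-- what changed: Replaces the while/for tally loop with the closed form m - 6*(m//10) for m = n % 100 (each of the m//10 multiples of 10 in 1..m contributes -5 instead of +1, a net -6).
import Mathlib
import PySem

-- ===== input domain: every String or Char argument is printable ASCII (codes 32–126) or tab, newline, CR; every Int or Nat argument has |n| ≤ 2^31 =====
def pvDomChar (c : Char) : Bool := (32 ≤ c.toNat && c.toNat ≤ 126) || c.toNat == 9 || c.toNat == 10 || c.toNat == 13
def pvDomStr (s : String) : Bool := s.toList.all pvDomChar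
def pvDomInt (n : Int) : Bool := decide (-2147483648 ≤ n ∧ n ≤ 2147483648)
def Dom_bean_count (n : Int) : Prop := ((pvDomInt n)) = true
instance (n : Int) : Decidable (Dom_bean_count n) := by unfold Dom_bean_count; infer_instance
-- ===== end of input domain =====

-- B replaces A's while/for tally loop by the closed form m - 6*(m//10) for m = n % 100 (simpler).

-- ===== PORT A =====
-- the body of the for-loop over i
def beanStep (bean i : Int) : Int :=
  if PySem.Int.mod i 100 = 0 then 0
  else if PySem.Int.mod i 10 = 0 then bean - 5
  else bean + 1

-- termination helper, cited by beanLoop's decreasing_by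
theorem beanNext_natAbs_lt (n : Int) (h : n ≠ 0) :
    (PySem.Int.floordiv (PySem.Int.mod n 100) 100).natAbs < n.natAbs := by
  have hm : PySem.Int.mod n 100 = n % 100 := PySem.Int.mod_eq_emod_of_pos (by norm_num)
  have h0 : 0 ≤ n % 100 := Int.emod_nonneg n (by norm_num)
  have h1 : n % 100 < 100 := Int.emod_lt_of_pos n (by norm_num)
  have hd : PySem.Int.floordiv (PySem.Int.mod n 100) 100 = 0 := by
    rw [hm, (PySem.Int.floordiv_eq_iff_of_pos (by norm_num))]
    omega
  rw [hd]
  simpa using Int.natAbs_pos.mpr h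

-- the 'while n != 0' loop
def beanLoop (n bean : Int) : Int :=
  if h : n = 0 then bean
  else
    let n1 := PySem.Int.mod n 100
    let bean1 := (PySem.List.pyRange 1 (n1 + 1) 1).foldl beanStep bean
    beanLoop (PySem.Int.floordiv n1 100) bean1
termination_by n.natAbs
decreasing_by exact beanNext_natAbs_lt n h

def bean_count (n : Int) : Int :=
  if n ≤ 0 ∨ PySem.Int.mod n 100 = 0 then 0
  else beanLoop n 0

-- ===== PORT B =====
def bean_count_alt (n : Int) : Int :=
  if n ≤ 0 ∨ PySem.Int.mod n 100 = 0 then 0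
  else
    let m := PySem.Int.mod n 100
    m - 6 * PySem.Int.floordiv m 10

-- ===== PRECONDITION & SPEC =====
def Spec_bean_count (n : Int) (out : Int) : Prop := out = bean_count_alt n
instance (n : Int) (out : Int) : Decidable (Spec_bean_count n out) := by unfold Spec_bean_count; infer_instance

-- ===== CLAIM (what is proved, stated in full; the proofs are below) =====
def Claim_equal_bean_count : Prop := ∀ (n : Int), Dom_bean_count n → Spec_bean_count n (bean_count n)

-- ===== LEMMAS AND PROOFS =====

-- the tally of 1..k equals the closed form, for every k < 100
theorem bean_fold_closed : ∀ k : Nat, k < 100 →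
    (PySem.List.pyRange 1 ((k : Int) + 1) 1).foldl beanStep 0
      = (k : Int) - 6 * PySem.Int.floordiv (k : Int) 10 := by decide

-- ===== VERDICT (by name: the statement is the Claim_ definition above) =====
theorem bean_count_spec : Claim_equal_bean_count := by
  intro n _
  unfold Spec_bean_count bean_count bean_count_alt
  by_cases hg : n ≤ 0 ∨ PySem.Int.mod n 100 = 0
  · rw [if_pos hg, if_pos hg]
  · simp only [hg, if_false]
    push Not at hg
    obtain ⟨hn, hm0⟩ := hg
    have hm : PySem.Int.mod n 100 = n % 100 := PySem.Int.mod_eq_emod_of_pos (by norm_num)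
    have h0 : 0 ≤ n % 100 := Int.emod_nonneg n (by norm_num)
    have h1 : n % 100 < 100 := Int.emod_lt_of_pos n (by norm_num)
    -- unfold the loop twice: one real iteration, then n becomes 0
    rw [beanLoop, dif_neg (by omega : n ≠ 0)]
    have hd : PySem.Int.floordiv (PySem.Int.mod n 100) 100 = 0 := by
      rw [hm, (PySem.Int.floordiv_eq_iff_of_pos (by norm_num))]; omega
    simp only [hd]
    rw [beanLoop, dif_pos rfl]
    have hk : PySem.Int.mod n 100 = ((n % 100).toNat : Int) := by omega
    rw [hk]
    exact bean_fold_closed (n % 100).toNat (by omega)
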